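-- pv_equiv track=rewrite | github.com/Megumi-xs/S-AES- | S-AES.py | ascii_to_blocks
-- ===== SOURCE A (Python) =====
-- def ascii_to_blocks(text):
--     blocks = []
--     for i in range(0, len(text), 2):
--         block = 0
--         if i < len(text):
--             block |= (ord(text[i]) << 8)
--         if i + 1 < len(text):
--             block |= ord(text[i + 1])
--         blocks.append(block)
--     return blocks
-- ===== SOURCE B (Python) =====
-- def ascii_to_blocks(text):
--     blocks = []
--     for j, c in enumerate(text):
--         if j % 2 == 0:
--             blocks.append(ord(c) << 8)
--         else:
--             blocks[-1] |= ord(c)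
--     return blocks
-- ===== Notes on version B (the rewrite author's own statement) =====
-- stated objective: alternative
-- what changed: Replaces the stride-2 index loop with guarded indexing per block by a single pass over enumerate(text) that keeps parity state: even positions append the high byte, odd positions or the low byte into the last block.
import Mathlib
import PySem

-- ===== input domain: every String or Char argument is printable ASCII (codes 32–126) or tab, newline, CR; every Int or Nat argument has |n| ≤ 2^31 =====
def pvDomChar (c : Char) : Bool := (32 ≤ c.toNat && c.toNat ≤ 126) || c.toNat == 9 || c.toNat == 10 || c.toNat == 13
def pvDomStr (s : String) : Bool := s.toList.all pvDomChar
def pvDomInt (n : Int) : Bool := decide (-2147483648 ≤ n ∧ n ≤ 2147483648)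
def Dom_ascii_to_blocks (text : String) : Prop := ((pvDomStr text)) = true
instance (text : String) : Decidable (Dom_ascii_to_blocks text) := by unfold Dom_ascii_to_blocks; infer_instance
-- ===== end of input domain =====

-- B replaces A's stride-2 index loop by a single pass over enumerate(text) with parity state (alternative decomposition, same cost).

-- ===== PORT A =====
-- ord(text[i]); the 'none' default is unreachable: A only indexes under an in-range guard
def pvOrdAt (text : String) (i : Int) : Int :=
  match PySem.Str.pyGet? text i with
  | some c => (c.toNat : Int)
  | none => 0

def pvBlockA (text : String) (i : Int) : Int :=
  let block : Int := 0
  let block := if i < PySem.Str.len text then PySem.Int.bor block (pvOrdAt text i <<< 8) else block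
  let block := if i + 1 < PySem.Str.len text then PySem.Int.bor block (pvOrdAt text (i + 1)) else block
  block

def ascii_to_blocks (text : String) : List Int :=
  (PySem.List.pyRange 0 (PySem.Str.len text) 2).foldl
    (fun blocks i => blocks ++ [pvBlockA text i]) []

-- ===== PORT B =====
-- single pass: even index appends ord(c) << 8, odd index ors ord(c) into blocks[-1]
-- (the pyGetD default 0 is unreachable: blocks is nonempty whenever j is odd)
def ascii_to_blocks_alt (text : String) : List Int :=
  (PySem.List.enumerate text.toList 0).foldl
    (fun blocks jc =>
      if PySem.Int.mod jc.1 2 = 0 then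
        blocks ++ [((jc.2.toNat : Int)) <<< 8]
      else
        PySem.List.pySetD blocks (-1)
          (PySem.Int.bor (PySem.List.pyGetD blocks (-1) 0) (jc.2.toNat : Int)))
    []

-- ===== PRECONDITION & SPEC =====
def Spec_ascii_to_blocks (text : String) (out : List Int) : Prop := out = ascii_to_blocks_alt text
instance (text : String) (out : List Int) : Decidable (Spec_ascii_to_blocks text out) := by unfold Spec_ascii_to_blocks; infer_instance

-- ===== CLAIM (what is proved, stated in full; the proofs are below) =====
def Claim_equal_ascii_to_blocks : Prop := ∀ (text : String), Dom_ascii_to_blocks text → Spec_ascii_to_blocks text (ascii_to_blocks text)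

-- ===== LEMMAS AND PROOFS =====

-- common reference shape: blocks of two chars, built front-to-back
def pvPairs : List Char → List Int
  | [] => []
  | [h] => [((h.toNat : Int)) <<< 8]
  | h :: l :: rest => PySem.Int.bor (((h.toNat : Int)) <<< 8) ((l.toNat : Int)) :: pvPairs rest

theorem pv_bor_zero_left (a : Int) : PySem.Int.bor 0 a = a := by
  simp only [PySem.Int.bor]
  split_ifs <;> simp_all

-- A's per-block assembly, restated on the char list with Nat indices
def pvBlockL (cs : List Char) (k : Nat) : Int :=
  let b : Int := 0
  let b := if 2 * k < cs.length then PySem.Int.bor b (((cs.getD (2 * k) 'a').toNat : Int) <<< 8) else b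
  if 2 * k + 1 < cs.length then PySem.Int.bor b (((cs.getD (2 * k + 1) 'a').toNat : Int)) else b

theorem pv_blockA_eq (cs : List Char) (k : Nat) :
    pvBlockA (String.ofList cs) (0 + 2 * (k : Int)) = pvBlockL cs k := by
  have e1 : (0 : Int) + 2 * (k : Int) = ((2 * k : Nat) : Int) := by push_cast; ring
  have e2 : ((2 * k : Nat) : Int) + 1 = ((2 * k + 1 : Nat) : Int) := by push_cast; ring
  simp only [pvBlockA, pvBlockL, pvOrdAt, e1, e2, PySem.Str.len_eq, String.toList_ofList,
    PySem.Str.pyGet?_natCast, Nat.cast_lt]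
  by_cases h1 : 2 * k < cs.length <;> by_cases h2 : 2 * k + 1 < cs.length <;>
    simp [h1, h2, List.getD_eq_getElem?_getD]

theorem pv_blockL_shift (h l : Char) (rest : List Char) (k : Nat) :
    pvBlockL (h :: l :: rest) (k + 1) = pvBlockL rest k := by
  have i1 : 2 * (k + 1) = 2 * k + 1 + 1 := by omega
  have i2 : 2 * (k + 1) + 1 = 2 * k + 1 + 1 + 1 := by omega
  simp only [pvBlockL, i1, List.getD_cons_succ, List.length_cons]
  have g1 : 2 * k + 1 + 1 < rest.length + 1 + 1 ↔ 2 * k < rest.length := by omega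
  have g2 : 2 * k + 1 + 1 + 1 < rest.length + 1 + 1 ↔ 2 * k + 1 < rest.length := by omega
  simp only [g1, g2]

theorem pv_A_pairs (cs : List Char) :
    (List.range ((cs.length + 1) / 2)).map (pvBlockL cs) = pvPairs cs := by
  induction cs using pvPairs.induct with
  | case1 => simp [pvPairs]
  | case2 h =>
      simp [pvPairs, pvBlockL, pv_bor_zero_left, List.range_succ]
  | case3 h l rest ih =>
      have hc : ((h :: l :: rest).length + 1) / 2 = (rest.length + 1) / 2 + 1 := by
        simp; omega
      rw [hc, List.range_succ_eq_map, List.map_cons, List.map_map]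
      have hd : pvBlockL (h :: l :: rest) 0 =
          PySem.Int.bor (((h.toNat : Int)) <<< 8) ((l.toNat : Int)) := by
        simp [pvBlockL, pv_bor_zero_left]
      have ht : (List.range ((rest.length + 1) / 2)).map (pvBlockL (h :: l :: rest) ∘ Nat.succ) =
          (List.range ((rest.length + 1) / 2)).map (pvBlockL rest) :=
        List.map_congr_left (fun k _ => pv_blockL_shift h l rest k)
      rw [hd, ht, ih]
      rfl

theorem pv_A_eq (text : String) : ascii_to_blocks text = pvPairs text.toList := by
  unfold ascii_to_blocks
  rw [PySem.List.foldl_append_singleton_eq_map, List.nil_append,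
    PySem.List.pyRange_of_pos 0 (PySem.Str.len text) (by norm_num), List.map_map,
    PySem.Str.len_eq]
  have hc : (if (0 : Int) < (text.toList.length : Int) then
      (((text.toList.length : Int) - 0 + 2 - 1) / 2).toNat else 0) = (text.toList.length + 1) / 2 := by
    split_ifs <;> omega
  rw [hc]
  have := pv_A_pairs text.toList
  rw [← this]
  refine List.map_congr_left (fun k _ => ?_)
  have : String.ofList text.toList = text := String.ofList_toList
  calc pvBlockA text (0 + 2 * (k : Int))
      = pvBlockA (String.ofList text.toList) (0 + 2 * (k : Int)) := by rw [this]
    _ = pvBlockL text.toList k := pv_blockA_eq text.toList k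

theorem pv_pySetD_append_neg_one (xs : List Int) (x v : Int) :
    PySem.List.pySetD (xs ++ [x]) (-1) v = xs ++ [v] := by
  simp [PySem.List.pySetD, PySem.List.pySet?, PySem.List.pyIdx?]

theorem pv_B_loop (cs : List Char) (j : Int) (acc : List Int) (hj : PySem.Int.mod j 2 = 0) :
    (PySem.List.enumerate cs j).foldl
      (fun blocks jc =>
        if PySem.Int.mod jc.1 2 = 0 then
          blocks ++ [((jc.2.toNat : Int)) <<< 8]
        else
          PySem.List.pySetD blocks (-1)
            (PySem.Int.bor (PySem.List.pyGetD blocks (-1) 0) (jc.2.toNat : Int)))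
      acc = acc ++ pvPairs cs := by
  have hmod : ∀ m : Int, PySem.Int.mod m 2 = m % 2 := fun m => by
    simp [PySem.Int.mod, Int.fmod_eq_emod]
  induction cs using pvPairs.induct generalizing j acc with
  | case1 => simp [pvPairs, PySem.List.enumerate_nil]
  | case2 h =>
      rw [PySem.List.enumerate_cons, PySem.List.enumerate_nil]
      simp only [List.foldl_cons, List.foldl_nil]
      rw [if_pos hj]
      simp [pvPairs]
  | case3 h l rest ih =>
      have hj' : j % 2 = 0 := (hmod j) ▸ hj
      have hj1 : ¬ PySem.Int.mod (j + 1) 2 = 0 := by rw [hmod]; omega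
      have hj2 : PySem.Int.mod (j + 1 + 1) 2 = 0 := by rw [hmod]; omega
      rw [PySem.List.enumerate_cons, PySem.List.enumerate_cons]
      simp only [List.foldl_cons]
      rw [if_pos hj, if_neg hj1]
      rw [PySem.List.pyGetD_neg_one_append_singleton, pv_pySetD_append_neg_one,
        ih (j + 1 + 1) _ hj2]
      simp [pvPairs]

theorem pv_B_eq (text : String) : ascii_to_blocks_alt text = pvPairs text.toList := by
  unfold ascii_to_blocks_alt
  rw [pv_B_loop text.toList 0 [] (by decide), List.nil_append]

-- ===== VERDICT (by name: the statement is the Claim_ definition above) =====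
theorem ascii_to_blocks_spec : Claim_equal_ascii_to_blocks := by
  intro text _
  unfold Spec_ascii_to_blocks
  rw [pv_A_eq, pv_B_eq]
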